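-- pv_equiv track=rewrite | github.com/jooonyong/2021-2-Algorithm-Homework | assignment1/recursion.py | Recursion_algorithm
-- ===== SOURCE A (Python) =====
-- def Recursion_algorithm(n):
--     if(n==1 or n==2):
--         return 1
--     else:
--         sum = 0
--         for i in range(1,n):
--             sum += Recursion_algorithm(i)
--
--         return sum
-- ===== SOURCE B (Python) =====
-- def Recursion_algorithm(n):
--     if n == 1 or n == 2:
--         return 1
--     if n <= 0:
--         return 0
--     return 2 ** (n - 2)
-- ===== Notes on version B (the rewrite author's own statement) =====
-- stated objective: faster
-- what changed: Replaced the exponential recursive summation with a direct closed-form power of two (plus the trivial base cases); intended as faster — a timing run saw A time out on the larger generated inputs while B returned, but no clean ratio could be measured at a size both finish.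
import Mathlib
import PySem

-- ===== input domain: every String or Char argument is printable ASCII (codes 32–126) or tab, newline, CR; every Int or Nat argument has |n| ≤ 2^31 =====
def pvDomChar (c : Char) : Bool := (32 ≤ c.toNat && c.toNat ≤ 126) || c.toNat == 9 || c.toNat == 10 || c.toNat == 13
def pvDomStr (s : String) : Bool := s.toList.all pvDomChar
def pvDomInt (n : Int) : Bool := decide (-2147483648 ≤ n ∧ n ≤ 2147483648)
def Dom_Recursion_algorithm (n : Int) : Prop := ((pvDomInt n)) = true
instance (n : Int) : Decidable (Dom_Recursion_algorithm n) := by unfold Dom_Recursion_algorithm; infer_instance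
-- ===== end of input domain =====

-- B replaces A's recursive summation by the closed form 2^(n-2); intended as faster (a timing run saw A time out on the larger generated inputs while B returned; no clean ratio was measurable at a size both finish).

-- ===== PORT A =====
def Recursion_algorithm (n : Int) : Int :=
  if n == 1 || n == 2 then 1
  else
    (PySem.List.pyRange 1 n 1).attach.foldl
      (fun s i => s + Recursion_algorithm i.1) 0
termination_by n.toNat
decreasing_by
  have h := PySem.List.mem_pyRange_one.mp i.2
  omega

-- ===== PORT B =====
def Recursion_algorithm_alt (n : Int) : Int :=
  if n == 1 || n == 2 then 1
  else if n ≤ 0 then 0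
  else 2 ^ (n - 2).toNat

-- ===== PRECONDITION & SPEC =====
def Spec_Recursion_algorithm (n : Int) (out : Int) : Prop := out = Recursion_algorithm_alt n
instance (n : Int) (out : Int) : Decidable (Spec_Recursion_algorithm n out) := by unfold Spec_Recursion_algorithm; infer_instance

-- ===== CLAIM (what is proved, stated in full; the proofs are below) =====
def Claim_equal_Recursion_algorithm : Prop := ∀ (n : Int), Dom_Recursion_algorithm n → Spec_Recursion_algorithm n (Recursion_algorithm n)

-- ===== LEMMAS AND PROOFS =====

-- A, unfolded through the attach-fold into a plain sum of the recursive values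
theorem recA_unfold (n : Int) (h : ¬(n = 1 ∨ n = 2)) :
    Recursion_algorithm n = ((PySem.List.pyRange 1 n 1).map Recursion_algorithm).sum := by
  rw [Recursion_algorithm]
  have h1 : (n == 1 || n == 2) = false := by
    simp only [Bool.or_eq_false_iff, beq_eq_false_iff_ne]
    exact ⟨fun e => h (Or.inl e), fun e => h (Or.inr e)⟩
  rw [h1]
  simp only [Bool.false_eq_true, if_false]
  rw [List.foldl_attach (f := fun (s : Int) x => s + Recursion_algorithm x) (b := 0),
      PySem.List.foldl_add]
  simp

theorem recA_nonpos (n : Int) (h : n ≤ 0) : Recursion_algorithm n = 0 := by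
  rw [recA_unfold n (by omega), PySem.List.pyRange_one_eq_nil (by omega)]
  simp

-- the heart: for k ≥ 0, the sum A computes at n = 3 + k equals 2^(k+1)
theorem recA_sum (k : Nat) :
    ((PySem.List.pyRange 1 (3 + (k : Int)) 1).map Recursion_algorithm).sum = 2 ^ (k + 1) := by
  induction k with
  | zero =>
    have : PySem.List.pyRange 1 3 1 = [1, 2] := by decide
    simp only [Nat.cast_zero, add_zero, this]
    have h1 : Recursion_algorithm 1 = 1 := by rw [Recursion_algorithm]; decide
    have h2 : Recursion_algorithm 2 = 1 := by rw [Recursion_algorithm]; decide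
    simp [h1, h2]
  | succ k ih =>
    have hsplit : PySem.List.pyRange 1 (3 + ((k : Int) + 1)) 1
        = PySem.List.pyRange 1 (3 + (k : Int)) 1 ++ [3 + (k : Int)] := by
      have := PySem.List.pyRange_one_succ_right (a := 1) (b := 3 + (k : Int)) (by omega)
      rw [← this]; ring_nf
    have hf : Recursion_algorithm (3 + (k : Int)) = 2 ^ (k + 1) := by
      rw [recA_unfold _ (by omega), ih]
    push_cast
    rw [hsplit]
    simp [hf, ih, pow_succ]
    ring

theorem recA_closed (n : Int) (h : 3 ≤ n) :
    Recursion_algorithm n = 2 ^ (n - 2).toNat := by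
  obtain ⟨k, hk⟩ : ∃ k : Nat, n = 3 + (k : Int) := ⟨(n - 3).toNat, by omega⟩
  subst hk
  rw [recA_unfold _ (by omega), recA_sum]
  congr 1
  omega

-- ===== VERDICT (by name: the statement is the Claim_ definition above) =====
theorem Recursion_algorithm_spec : Claim_equal_Recursion_algorithm := by
  intro n _
  unfold Spec_Recursion_algorithm Recursion_algorithm_alt
  by_cases h12 : n = 1 ∨ n = 2
  · rcases h12 with h | h <;> subst h <;> rw [Recursion_algorithm] <;> decide
  · have h1 : (n == 1 || n == 2) = false := by
      simp only [Bool.or_eq_false_iff, beq_eq_false_iff_ne]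
      exact ⟨fun e => h12 (Or.inl e), fun e => h12 (Or.inr e)⟩
    rw [h1]
    simp only [Bool.false_eq_true, if_false]
    by_cases hle : n ≤ 0
    · rw [if_pos hle, recA_nonpos n hle]
    · rw [if_neg hle, recA_closed n (by omega)]
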